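-- pv_equiv track=rewrite | github.com/brigitteunger/katas | test_find_duplicate_number.py | findDuplicates_set
-- ===== SOURCE A (Python) =====
-- from typing import List
--
-- def findDuplicates_set(nums: List[int]) -> int:
--     if not nums:
--         return None
--     seen = set()
--     for num in nums:
--         if num in seen:
--             return num
--         else:
--             seen.add(num)
--
--     return None
-- ===== SOURCE B (Python) =====
-- from typing import List
--
--
-- def findDuplicates_set(nums: List[int]) -> int:
--     first = {}
--     for i, num in enumerate(nums):
--         if num not in first:
--             first[num] = i
--     candidates = [i for i, num in enumerate(nums) if first[num] < i]
--     if not candidates: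
--         return None
--     return nums[min(candidates)]
-- ===== Notes on version B (the rewrite author's own statement) =====
-- stated objective: alternative
-- what changed: Replaces A's early-return seen-set scan with a staged computation: first build a map from value to its first-occurrence index, then collect every position whose element occurred earlier, take the minimum position, and index back into the list; no early return and no seen-set.
import Mathlib
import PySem

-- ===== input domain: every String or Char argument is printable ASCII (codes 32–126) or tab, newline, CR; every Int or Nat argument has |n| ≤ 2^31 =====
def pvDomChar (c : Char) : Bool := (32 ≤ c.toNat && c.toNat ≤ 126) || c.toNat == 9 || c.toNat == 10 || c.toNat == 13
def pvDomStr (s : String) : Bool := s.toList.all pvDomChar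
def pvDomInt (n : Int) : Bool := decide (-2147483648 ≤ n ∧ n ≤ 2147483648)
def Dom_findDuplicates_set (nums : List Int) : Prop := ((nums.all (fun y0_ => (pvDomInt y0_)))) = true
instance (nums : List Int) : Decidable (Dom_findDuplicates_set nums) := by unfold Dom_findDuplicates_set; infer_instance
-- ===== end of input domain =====

-- B replaces A's early-return seen-set scan by a staged computation: build a first-occurrence-index map, collect all repeat positions, take their minimum, index back into the list (alternative decomposition).

-- ===== PORT A =====
def fdsLoopA : List Int → PySem.Set Int → Option Int
  | [], _ => none
  | n :: rest, seen =>
      if PySem.Set.contains seen n then some n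
      else fdsLoopA rest (PySem.Set.add seen n)

def findDuplicates_set (nums : List Int) : Option Int :=
  if nums = [] then none
  else fdsLoopA nums PySem.Set.empty

-- ===== PORT B =====
-- first = {}; for i, num in enumerate(nums): if num not in first: first[num] = i
def fdsFirst (nums : List Int) : PySem.Dict Int Int :=
  (PySem.List.enumerate nums 0).foldl
    (fun d p => if d.contains p.2 then d else d.insert p.2 p.1) PySem.Dict.empty

-- [i for i, num in enumerate(nums) if first[num] < i]
-- first[num]: the key is always present (the first pass inserted every element of nums), so KeyError is unreachable;
-- the none branch of get? is dead code on every input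
def fdsCand (nums : List Int) : List Int :=
  let first := fdsFirst nums
  (PySem.List.enumerate nums 0).filterMap
    (fun p => match first.get? p.2 with
              | some j => if j < p.1 then some p.1 else none
              | none => none)

-- nums[min(candidates)]: pyGet? is exact here (the index is always in range, so Python never raises)
def findDuplicates_set_alt (nums : List Int) : Option Int :=
  let candidates := fdsCand nums
  if candidates = [] then none
  else
    match PySem.List.min? candidates (fun x => x) with
    | none => none
    | some m => PySem.List.pyGet? nums m

-- ===== PRECONDITION & SPEC =====
def Spec_findDuplicates_set (nums : List Int) (out : Option Int) : Prop := out = findDuplicates_set_alt nums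
instance (nums : List Int) (out : Option Int) : Decidable (Spec_findDuplicates_set nums out) := by unfold Spec_findDuplicates_set; infer_instance

-- ===== CLAIM (what is proved, stated in full; the proofs are below) =====
def Claim_equal_findDuplicates_set : Prop := ∀ (nums : List Int), Dom_findDuplicates_set nums → Spec_findDuplicates_set nums (findDuplicates_set nums)

-- ===== LEMMAS AND PROOFS =====

-- the first-occurrence loop computes index? shifted by the start value
lemma fds_first_loop (xs : List Int) (s : Int) (d : PySem.Dict Int Int) (v : Int) :
    ((PySem.List.enumerate xs s).foldl
        (fun d p => if d.contains p.2 then d else d.insert p.2 p.1) d).get? v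
      = if (d.get? v).isSome then d.get? v
        else (PySem.List.index? xs v).map (fun k : Nat => s + (k : Int)) := by
  induction xs generalizing s d with
  | nil =>
    rw [PySem.List.enumerate_nil]
    simp only [List.foldl_nil, PySem.List.index?_eq_idxOf?, List.idxOf?_nil, Option.map_none]
    cases d.get? v <;> simp
  | cons x t ih =>
    rw [PySem.List.enumerate_cons, List.foldl_cons]
    by_cases hd : d.contains x
    · simp only [hd, if_true]
      rw [ih]
      by_cases hv : (d.get? v).isSome
      · simp [hv]
      · have hne : x ≠ v := by
          rintro rfl
          rw [PySem.Dict.contains_eq_isSome_get?] at hd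
          exact hv hd
        rw [PySem.List.index?_cons_of_ne t hne]
        simp only [hv, Option.map_map]
        cases PySem.List.index? t v <;> simp <;> omega
    · rw [if_neg hd]
      rw [ih]
      by_cases hvx : v = x
      · subst hvx
        have hnone : d.get? v = none := by
          rw [PySem.Dict.contains_eq_isSome_get?] at hd
          exact Option.not_isSome_iff_eq_none.1 hd
        rw [PySem.Dict.get?_insert_self, PySem.List.index?_cons_self]
        simp [hnone]
      · rw [PySem.Dict.get?_insert_of_ne d s hvx]
        by_cases hv : (d.get? v).isSome
        · simp [hv]
        · rw [PySem.List.index?_cons_of_ne t (fun h => hvx h.symm)]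
          simp only [hv, Option.map_map]
          cases PySem.List.index? t v <;> simp <;> omega

-- the map built by pass 1 is exactly the first-occurrence index
lemma fds_first_get (nums : List Int) (v : Int) :
    (fdsFirst nums).get? v = (PySem.List.index? nums v).map (fun k : Nat => (k : Int)) := by
  unfold fdsFirst
  rw [fds_first_loop]
  simp [PySem.Dict.get?_empty]

-- first index of n in pre ++ n :: rest when n ∉ pre is exactly pre.length
lemma fds_index_not_mem (pre rest : List Int) (n : Int) (h : n ∉ pre) :
    PySem.List.index? (pre ++ n :: rest) n = some pre.length := by
  rw [PySem.List.index?_eq_some_iff]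
  exact ⟨pre, rest, rfl, rfl, h⟩

lemma fds_index_mem (pre rest : List Int) (n : Int) (h : n ∈ pre) :
    ∃ k, PySem.List.index? (pre ++ n :: rest) n = some k ∧ k < pre.length := by
  rw [PySem.List.index?_append_of_mem _ h]
  have hs := (PySem.List.index?_isSome_iff (xs := pre) (v := n)).2 h
  obtain ⟨k, hk⟩ := Option.isSome_iff_exists.1 hs
  refine ⟨k, hk, ?_⟩
  obtain ⟨p, s, heq, hlen, _⟩ := (PySem.List.index?_eq_some_iff _ _ _).1 hk
  subst heq hlen
  simp

-- the filtered enumerate indices starting at s are all ≥ s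
lemma fds_cand_ge (g : Int × Int → Option Int) (hg : ∀ p j, g p = some j → j = p.1)
    (xs : List Int) (s : Int) :
    ∀ j ∈ (PySem.List.enumerate xs s).filterMap g, s ≤ j := by
  induction xs generalizing s with
  | nil => simp [PySem.List.enumerate_nil]
  | cons x t ih =>
    intro j hj
    rw [PySem.List.enumerate_cons, List.filterMap_cons] at hj
    cases hgx : g (s, x) with
    | none =>
      rw [hgx] at hj
      have := ih (s + 1) j hj; omega
    | some j' =>
      rw [hgx] at hj
      rcases List.mem_cons.1 hj with rfl | h
      · have := hg (s, x) j hgx; simp at this; omega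
      · have := ih (s + 1) j h; omega

-- and strictly increasing
lemma fds_cand_pairwise (g : Int × Int → Option Int) (hg : ∀ p j, g p = some j → j = p.1)
    (xs : List Int) (s : Int) :
    ((PySem.List.enumerate xs s).filterMap g).Pairwise (· < ·) := by
  induction xs generalizing s with
  | nil => simp [PySem.List.enumerate_nil]
  | cons x t ih =>
    rw [PySem.List.enumerate_cons, List.filterMap_cons]
    cases hgx : g (s, x) with
    | none => exact ih (s + 1)
    | some j' =>
      refine List.pairwise_cons.2 ⟨?_, ih (s + 1)⟩
      intro j hj
      have h1 := fds_cand_ge g hg t (s + 1) j hj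
      have h2 := hg (s, x) j' hgx
      simp at h2; omega

-- min of a strictly increasing list is its head
lemma fds_min_sorted (l : List Int) (h : l.Pairwise (· < ·)) :
    PySem.List.min? l (fun x => x) = l.head? := by
  cases l with
  | nil => rfl
  | cons a t =>
    cases hmn : PySem.List.min? (a :: t) (fun x : Int => x) with
    | none => exact absurd ((PySem.List.min?_eq_none_iff _ _).1 hmn) (by simp)
    | some m =>
      have hmem := PySem.List.min?_mem hmn
      have hmin := PySem.List.min?_isMin hmn
      rcases List.mem_cons.1 hmem with rfl | hmt
      · rfl
      · have h1 : m ≤ a := hmin a (by simp)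
        have h2 : a < m := (List.pairwise_cons.1 h).1 m hmt
        omega

-- main invariant: A's loop over suf with seen = elements of pre equals B's staged
-- computation restricted to positions ≥ pre.length of the full list pre ++ suf
lemma fds_main (suf pre : List Int) :
    fdsLoopA suf (PySem.Set.ofList pre)
      = (match (PySem.List.enumerate suf (pre.length : Int)).filterMap
            (fun p => match (fdsFirst (pre ++ suf)).get? p.2 with
                      | some j => if j < p.1 then some p.1 else none
                      | none => none) with
         | [] => none
         | j :: _ => PySem.List.pyGet? (pre ++ suf) j) := by
  induction suf generalizing pre with
  | nil => simp [fdsLoopA, PySem.List.enumerate_nil]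
  | cons n rest ih =>
    rw [PySem.List.enumerate_cons, List.filterMap_cons]
    by_cases hmem : n ∈ pre
    · have hc : PySem.Set.contains (PySem.Set.ofList pre) n = true := by
        simp [PySem.Set.contains, PySem.Set.mem_ofList, hmem]
      obtain ⟨k, hk, hklt⟩ := fds_index_mem pre rest n hmem
      have hklt' : ((k : Nat) : Int) < ((pre.length : Nat) : Int) := by exact_mod_cast hklt
      have hk' : List.idxOf? n (pre ++ n :: rest) = some k := by
        rw [← PySem.List.index?_eq_idxOf?]; exact hk
      simp only [fdsLoopA, hc, if_true]
      simp [fds_first_get, hk', hklt']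
    · have hc : PySem.Set.contains (PySem.Set.ofList pre) n = false := by
        simp [PySem.Set.contains, PySem.Set.mem_ofList, hmem]
      have hnm' : List.idxOf? n (pre ++ n :: rest) = some pre.length := by
        rw [← PySem.List.index?_eq_idxOf?]; exact fds_index_not_mem pre rest n hmem
      simp only [fdsLoopA, hc, Bool.false_eq_true, if_false]
      simp [fds_first_get, hnm']
      have hadd : PySem.Set.add (PySem.Set.ofList pre) n = PySem.Set.ofList (pre ++ [n]) := by
        rw [PySem.Set.ofList_eq_foldl, PySem.Set.ofList_eq_foldl, List.foldl_append]
        rfl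
      rw [hadd, ih (pre ++ [n])]
      have hlen : ((pre ++ [n]).length : Int) = (pre.length : Int) + 1 := by simp
      rw [hlen]
      simp [List.append_assoc, fds_first_get]

-- ===== VERDICT (by name: the statement is the Claim_ definition above) =====
theorem findDuplicates_set_spec : Claim_equal_findDuplicates_set := by
  intro nums _
  unfold Spec_findDuplicates_set findDuplicates_set findDuplicates_set_alt
  have hg : ∀ (p : Int × Int) (j : Int),
      (match (fdsFirst nums).get? p.2 with
       | some j => if j < p.1 then some p.1 else none
       | none => none) = some j → j = p.1 := by
    intro p j h
    rcases hq : (fdsFirst nums).get? p.2 with _ | q <;> rw [hq] at h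
    · simp at h
    · by_cases hlt : q < p.1
      · simp only [if_pos hlt] at h; exact (Option.some_inj.1 h).symm
      · simp only [if_neg hlt] at h; simp at h
  have hmin := fds_min_sorted (fdsCand nums) (fds_cand_pairwise _ hg nums 0)
  have hmain := fds_main nums []
  simp only [List.nil_append, Nat.cast_zero, List.length_nil] at hmain
  have hmain' : fdsLoopA nums PySem.Set.empty
      = (match fdsCand nums with
         | [] => none
         | j :: _ => PySem.List.pyGet? nums j) := hmain
  by_cases h : nums = []
  · subst h
    simp [fdsCand, PySem.List.enumerate_nil]
  · rw [if_neg h, hmain']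
    show _ = (if fdsCand nums = [] then none else _)
    rcases hcand : fdsCand nums with _ | ⟨j, t⟩
    · simp
    · rw [hcand] at hmin
      simp only [List.head?] at hmin
      simp [hmin]
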